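-- pv_equiv track=rewrite | github.com/DPNT-Sourcecode/CHK-jkrl01 | lib/solutions/CHK/checkout_solution.py | count_priciest_group_multibuys
-- ===== SOURCE A (Python) =====
-- def count_priciest_group_multibuys(
--     sku_counts: dict[str, int],
--     priciest_group_list: list[str],
--     multibuy_size: int,
--     ) -> tuple[int, dict[str,int]]:
--     """Picks the priciest combination from sku_count. Returns with a new
--     sku_count and the number of multibuys of multibuy_size found.
--
--     Args:
--         priciest_group: SKUs of multibuy group in descending price
--         multibuy_size: number of items to qualify as 1 multibuy
--
--     Return:
--         Tuple:
--             - number of multibuys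
--             - revised sku_count, omits items consumed by discount
--     """
--
--     number_of_multibuys = 0
--     while True:
--         # temporary state track sku_count state after picking an sku item
--         next_sku_counts = sku_counts.copy()
--         multibuy_picked = 0
--         # try picking the priciest group item multibuy_size times
--         for _ in range(1, multibuy_size+1, 1):
--             previous_multibuy_pick = multibuy_picked
--             for sku in priciest_group_list:
--                 # next priciest sku item found
--                 if sku in next_sku_counts:
--                     next_sku_counts[sku] -= 1
--                     # incrementing over using n from range clarifies the
--                     # intention better
--                     multibuy_picked += 1
--                     # ensure sku is removed from sku_count if exhausted
--                     if next_sku_counts[sku] == 0: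
--                             del next_sku_counts[sku]
--                     break # picking complete, consider next pick
--             # check if anything was picked
--             if previous_multibuy_pick == multibuy_picked:
--                 break # if not, means sku_count is exhausted from group items
--
--         # check if enough picked to count as part of multibuy
--         if multibuy_picked == multibuy_size:
--             number_of_multibuys += 1
--             # commit post picked sku_count state
--             sku_counts = next_sku_counts
--         else:
--             break # multibuy_picked could not be filled to multibuy_size which
--                   # means sku_count has been exhausted from this group of items
--
--     return number_of_multibuys, sku_counts
-- ===== SOURCE B (Python) =====
-- def count_priciest_group_multibuys(
--     sku_counts: dict[str, int],
--     priciest_group_list: list[str],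
--     multibuy_size: int,
--     ) -> tuple[int, dict[str, int]]:
--     """Closed-form version: the greedy round-by-round picking in the original
--     always consumes multibuys = total_group_items // multibuy_size complete
--     multibuys, taken priciest-first; compute the quotient directly and
--     remove the consumed items in one priciest-first pass."""
--     if multibuy_size <= 0:
--         # a multibuy of non-positive size can never be formed
--         return 0, dict(sku_counts)
--     group_set = set(priciest_group_list)
--     total = sum(c for s, c in sku_counts.items() if s in group_set)
--     number_of_multibuys = total // multibuy_size
--     remaining = number_of_multibuys * multibuy_size
--     new_counts = dict(sku_counts)
--     for sku in priciest_group_list: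
--         if remaining <= 0:
--             break
--         if sku in new_counts:
--             take = min(new_counts[sku], remaining)
--             if new_counts[sku] == take:
--                 del new_counts[sku]
--             else:
--                 new_counts[sku] -= take
--             remaining -= take
--     return number_of_multibuys, new_counts
-- ===== Notes on version B (the rewrite author's own statement) =====
-- stated objective: alternative
-- what changed: A repeatedly simulates whole multibuy rounds, picking consumed items one at a time and re-copying the dict each round; B computes the number of multibuys in closed form as total_group_items // multibuy_size and removes the consumed items in a single priciest-first pass (intended as faster, O(items) vs O(item count); a timing run could not confirm a ratio because A already times out on large inputs).
import Mathlib
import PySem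

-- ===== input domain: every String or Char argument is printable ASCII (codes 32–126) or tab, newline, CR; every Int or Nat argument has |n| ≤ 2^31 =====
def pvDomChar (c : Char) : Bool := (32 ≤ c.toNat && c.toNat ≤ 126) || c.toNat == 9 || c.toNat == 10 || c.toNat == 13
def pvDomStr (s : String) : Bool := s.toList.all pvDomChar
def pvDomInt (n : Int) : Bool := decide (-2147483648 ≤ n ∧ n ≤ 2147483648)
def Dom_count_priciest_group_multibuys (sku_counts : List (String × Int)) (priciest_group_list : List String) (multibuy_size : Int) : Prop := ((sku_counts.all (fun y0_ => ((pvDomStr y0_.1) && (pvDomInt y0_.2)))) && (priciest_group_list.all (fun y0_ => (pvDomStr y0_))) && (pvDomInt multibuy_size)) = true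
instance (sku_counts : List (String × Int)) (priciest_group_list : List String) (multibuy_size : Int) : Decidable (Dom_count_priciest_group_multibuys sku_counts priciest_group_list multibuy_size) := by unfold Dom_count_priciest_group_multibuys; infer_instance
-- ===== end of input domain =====

-- ===== PORT A =====
-- B computes A's result in closed form (quotient + one priciest-first removal pass)
-- instead of simulating the greedy picking round by round.

-- A, inner `for sku in priciest_group_list` loop: pick one item of the first group
-- sku present in the dict (decrement, delete when exhausted); `none` = nothing picked.
def pickSku (group : List String) (d : PySem.Dict String Int) :
    Option (PySem.Dict String Int) :=
  match group with
  | [] => none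
  | sku :: rest =>
    if d.contains sku then
      let d1 := d.modify sku 0 (· - 1)
      some (if d1.getD sku 0 = 0 then d1.erase sku else d1)
    else pickSku rest d

-- A, middle `for _ in range(1, multibuy_size+1, 1)` loop: try n picks, stop at the
-- first failed pick; returns (multibuy_picked, next_sku_counts).
def pickN (group : List String) : Nat → PySem.Dict String Int → Int × PySem.Dict String Int
  | 0, d => (0, d)
  | n + 1, d =>
    match pickSku group d with
    | none => (0, d)
    | some d' =>
      let r := pickN group n d'
      (r.1 + 1, r.2)

-- A, outer `while True` loop; the fuel argument only makes the recursion structural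
-- (it is chosen large enough to never run out on inputs where the Python terminates).
def whileLoopA (group : List String) (size : Int) :
    Nat → Int → PySem.Dict String Int → Int × PySem.Dict String Int
  | 0, acc, d => (acc, d)
  | fuel + 1, acc, d =>
    let r := pickN group size.toNat d
    if r.1 = size then whileLoopA group size fuel (acc + 1) r.2
    else (acc, d)

def count_priciest_group_multibuys (sku_counts : List (String × Int)) (priciest_group_list : List String) (multibuy_size : Int) : Int × (List (String × Int)) :=
  let d : PySem.Dict String Int := ⟨sku_counts⟩
  let fuel := sku_counts.foldl (fun a p => a + p.2.toNat) 0 + 1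
  let r := whileLoopA priciest_group_list multibuy_size fuel 0 d
  (r.1, r.2.items)

-- ===== PORT B =====
-- B's removal pass: subtract `remaining` consumed items from the dict, priciest first.
def consumeB (d : PySem.Dict String Int) (group : List String) (remaining : Int) :
    PySem.Dict String Int :=
  match group with
  | [] => d
  | sku :: rest =>
    if remaining ≤ 0 then d
    else
      match d.get? sku with
      | none => consumeB d rest remaining
      | some c =>
        let take := min c remaining
        let d' := if c = take then d.erase sku else d.modify sku 0 (· - take)
        consumeB d' rest (remaining - take)

def count_priciest_group_multibuys_alt (sku_counts : List (String × Int)) (priciest_group_list : List String) (multibuy_size : Int) : Int × (List (String × Int)) :=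
  if multibuy_size ≤ 0 then (0, sku_counts)
  else
    let d : PySem.Dict String Int := ⟨sku_counts⟩
    let group_set := PySem.List.dedup priciest_group_list
    let total := d.items.foldl (fun a p => if group_set.contains p.1 then a + p.2 else a) 0
    let m := PySem.Int.floordiv total multibuy_size
    (m, (consumeB d priciest_group_list (m * multibuy_size)).items)

-- ===== PRECONDITION & SPEC =====
-- Pre_ excludes only inputs where A never returns (it loops forever when
-- multibuy_size = 0, and when multibuy_size >= 1 while some group SKU has a
-- non-positive count) and duplicate-key lists, which do not represent a Python dict.
def Pre_count_priciest_group_multibuys (sku_counts : List (String × Int)) (priciest_group_list : List String) (multibuy_size : Int) : Prop :=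
  (sku_counts.map Prod.fst).Nodup ∧
  (multibuy_size < 0 ∨
    (1 ≤ multibuy_size ∧ ∀ p ∈ sku_counts, p.1 ∈ priciest_group_list → 1 ≤ p.2))
instance (sku_counts : List (String × Int)) (priciest_group_list : List String) (multibuy_size : Int) : Decidable (Pre_count_priciest_group_multibuys sku_counts priciest_group_list multibuy_size) := by unfold Pre_count_priciest_group_multibuys; infer_instance

def pvWitness_count_priciest_group_multibuys : (List (String × Int)) × List String × Int :=
  ([("A", 3), ("B", 2)], ["A", "B"], 3)

def Spec_count_priciest_group_multibuys (sku_counts : List (String × Int)) (priciest_group_list : List String) (multibuy_size : Int) (out : Int × (List (String × Int))) : Prop := out = count_priciest_group_multibuys_alt sku_counts priciest_group_list multibuy_size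
instance (sku_counts : List (String × Int)) (priciest_group_list : List String) (multibuy_size : Int) (out : Int × (List (String × Int))) : Decidable (Spec_count_priciest_group_multibuys sku_counts priciest_group_list multibuy_size out) := by unfold Spec_count_priciest_group_multibuys; infer_instance

-- ===== CLAIM (what is proved, stated in full; the proofs are below) =====
def Claim_equal_count_priciest_group_multibuys : Prop := ∀ (sku_counts : List (String × Int)) (priciest_group_list : List String) (multibuy_size : Int), Dom_count_priciest_group_multibuys sku_counts priciest_group_list multibuy_size → Pre_count_priciest_group_multibuys sku_counts priciest_group_list multibuy_size → Spec_count_priciest_group_multibuys sku_counts priciest_group_list multibuy_size (count_priciest_group_multibuys sku_counts priciest_group_list multibuy_size)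

-- ===== LEMMAS AND PROOFS =====

-- The group total of an item list: what B's summation loop computes.
def totL (group : List String) (l : List (String × Int)) : Int :=
  l.foldl (fun a p => if group.contains p.1 then a + p.2 else a) 0

theorem totL_eq_sum (group : List String) (l : List (String × Int)) :
    totL group l = (l.map (fun p => if p.1 ∈ group then p.2 else 0)).sum := by
  rw [totL, show (fun (a : Int) (p : String × Int) => if group.contains p.1 then a + p.2 else a)
      = (fun a p => a + (if p.1 ∈ group then p.2 else 0)) by
    funext a p
    by_cases h : p.1 ∈ group <;> simp [h], PySem.List.foldl_add]
  simp

theorem totL_dedup (group : List String) (l : List (String × Int)) :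
    totL (PySem.List.dedup group) l = totL group l := by
  rw [totL_eq_sum, totL_eq_sum]
  congr 1
  apply List.map_congr_left
  intro p _
  by_cases h : p.1 ∈ group <;> simp [h]

theorem totL_cons (group : List String) (p : String × Int) (l : List (String × Int)) :
    totL group (p :: l) = (if p.1 ∈ group then p.2 else 0) + totL group l := by
  simp [totL_eq_sum]

theorem totL_nonneg (group : List String) (l : List (String × Int))
    (h : ∀ p ∈ l, p.1 ∈ group → 1 ≤ p.2) : 0 ≤ totL group l := by
  rw [totL_eq_sum]
  apply List.sum_nonneg
  intro x hx
  obtain ⟨p, hp, rfl⟩ := List.mem_map.1 hx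
  by_cases hg : p.1 ∈ group
  · have := h p hp hg; simp [hg]; omega
  · simp [hg]

theorem totL_pos (group : List String) (l : List (String × Int)) (p0 : String × Int)
    (h : ∀ p ∈ l, p.1 ∈ group → 1 ≤ p.2) (hm : p0 ∈ l) (hg : p0.1 ∈ group) :
    1 ≤ totL group l := by
  rw [totL_eq_sum]
  have h1 : (if p0.1 ∈ group then p0.2 else 0) ≤ (l.map (fun p => if p.1 ∈ group then p.2 else 0)).sum := by
    apply List.single_le_sum
    · intro x hx
      obtain ⟨p, hp, rfl⟩ := List.mem_map.1 hx
      by_cases hg' : p.1 ∈ group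
      · have := h p hp hg'; simp [hg']; omega
      · simp [hg']
    · exact List.mem_map.2 ⟨p0, hm, rfl⟩
  have := h p0 hm hg
  rw [if_pos hg] at h1
  omega

theorem totL_le_fuel (group : List String) (l : List (String × Int)) :
    totL group l ≤ ((l.foldl (fun a p => a + p.2.toNat) 0 : Nat) : Int) := by
  have h1 : (l.foldl (fun a p => a + p.2.toNat) 0 : Nat) = (l.map (fun p => p.2.toNat)).sum := by
    rw [List.sum_eq_foldl, ← List.foldl_map]
  rw [h1, totL_eq_sum, Nat.cast_list_sum, List.map_map]
  apply List.sum_le_sum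
  intro p _
  by_cases hg : p.1 ∈ group
  · simp only [if_pos hg, Function.comp_apply]
    exact Int.self_le_toNat p.2
  · simp [hg]

theorem totL_filter (group : List String) (l : List (String × Int)) (k : String) (c : Int)
    (hnd : (l.map Prod.fst).Nodup) (hm : (k, c) ∈ l) :
    totL group (l.filter (fun p => !(p.1 == k))) = totL group l - (if k ∈ group then c else 0) := by
  induction l with
  | nil => simp at hm
  | cons p t ih =>
    simp only [List.map_cons, List.nodup_cons] at hnd
    by_cases hk : p.1 = k
    · have hp : p = (k, c) := by
        rcases List.mem_cons.1 hm with h | h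
        · exact h.symm
        · exact absurd (List.mem_map.2 ⟨_, h, rfl⟩) (by rw [hk] at hnd; exact hnd.1)
      have ht : t.filter (fun p => !(p.1 == k)) = t := by
        apply List.filter_eq_self.2
        intro q hq
        have : q.1 ≠ k := fun h => hnd.1 (by rw [← hk] at h; exact List.mem_map.2 ⟨q, hq, h⟩)
        simp [this]
      rw [List.filter_cons, if_neg (by simp [hk]), ht, totL_cons, hp]
      simp
    · have hm' : (k, c) ∈ t := by
        rcases List.mem_cons.1 hm with h | h
        · exact absurd (congrArg Prod.fst h.symm) hk
        · exact h
      rw [List.filter_cons, if_pos (by simp [hk]), totL_cons, totL_cons, ih hnd.2 hm']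
      ring

theorem totL_update (group : List String) (l : List (String × Int)) (k : String) (c v : Int)
    (hnd : (l.map Prod.fst).Nodup) (hm : (k, c) ∈ l) :
    totL group (l.map (fun p => if p.1 == k then (k, v) else p))
      = totL group l + (if k ∈ group then v - c else 0) := by
  induction l with
  | nil => simp at hm
  | cons p t ih =>
    simp only [List.map_cons, List.nodup_cons] at hnd
    by_cases hk : p.1 = k
    · have hp : p = (k, c) := by
        rcases List.mem_cons.1 hm with h | h
        · exact h.symm
        · exact absurd (List.mem_map.2 ⟨_, h, rfl⟩) (by rw [hk] at hnd; exact hnd.1)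
      have ht : t.map (fun p => if p.1 == k then (k, v) else p) = t := by
        rw [List.map_congr_left (g := id), List.map_id]
        intro q hq
        have : q.1 ≠ k := fun h => hnd.1 (by rw [← hk] at h; exact List.mem_map.2 ⟨q, hq, h⟩)
        simp [this]
      rw [List.map_cons, if_pos (by simp [hk]), ht, totL_cons, totL_cons, hp]
      simp
      split <;> ring
    · have hm' : (k, c) ∈ t := by
        rcases List.mem_cons.1 hm with h | h
        · exact absurd (congrArg Prod.fst h.symm) hk
        · exact h
      rw [List.map_cons, if_neg (by simp [hk]), totL_cons, totL_cons, ih hnd.2 hm']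
      ring

-- ---- small Dict facts the ports need ----

theorem get?_erase_self (d : PySem.Dict String Int) (k : String) :
    (d.erase k).get? k = none := by
  have : (d.items.filter (fun p => !(p.1 == k))).find? (fun p => p.1 == k) = none := by
    apply List.find?_eq_none.2
    intro p hp
    have := (List.mem_filter.1 hp).2
    simpa using this
  simp [PySem.Dict.erase, PySem.Dict.get?, this]

theorem get?_erase_of_ne (d : PySem.Dict String Int) (k k' : String) (h : k' ≠ k) :
    (d.erase k).get? k' = d.get? k' := by
  have key : ∀ l : List (String × Int),
      (l.filter (fun p => !(p.1 == k))).find? (fun p => p.1 == k') = l.find? (fun p => p.1 == k') := by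
    intro l
    induction l with
    | nil => simp
    | cons p t ih =>
      by_cases hk : p.1 = k
      · have hne : (p.1 == k') = false := by
          simp only [hk, beq_eq_false_iff_ne, ne_eq]
          exact fun hh => h hh.symm
        rw [List.filter_cons, if_neg (by simp [hk]), ih, List.find?_cons, hne]
      · rw [List.filter_cons, if_pos (by simp [hk])]
        rw [List.find?_cons, List.find?_cons]
        split
        · rfl
        · exact ih
  simp [PySem.Dict.erase, PySem.Dict.get?, key]

theorem filter_update_eq (l : List (String × Int)) (k : String) (v : Int) :
    (l.map (fun p => if p.1 == k then (k, v) else p)).filter (fun p => !(p.1 == k))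
      = l.filter (fun p => !(p.1 == k)) := by
  induction l with
  | nil => rfl
  | cons p t ih =>
    by_cases hk : p.1 = k
    · rw [List.map_cons, if_pos (by simp [hk]), List.filter_cons, List.filter_cons,
        if_neg (by simp), if_neg (by simp [hk]), ih]
    · rw [List.map_cons, if_neg (by simp [hk]), List.filter_cons, List.filter_cons,
        if_pos (by simp [hk]), if_pos (by simp [hk]), ih]

theorem insert_erase_self (d : PySem.Dict String Int) (k : String) (v : Int) :
    (d.insert k v).erase k = d.erase k := by
  apply PySem.Dict.ext
  by_cases hc : d.contains k = true
  · show ((d.insert k v).items.filter (fun p => !(p.1 == k)))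
        = (d.items.filter (fun p => !(p.1 == k)))
    rw [PySem.Dict.items_insert_of_contains d v hc, filter_update_eq]
  · show ((d.insert k v).items.filter (fun p => !(p.1 == k)))
        = (d.items.filter (fun p => !(p.1 == k)))
    rw [PySem.Dict.insert, if_neg hc]
    show ((d.items ++ [(k, v)]).filter (fun p => !(p.1 == k))) = d.items.filter (fun p => !(p.1 == k))
    rw [List.filter_append]
    simp

theorem keys_insert_existing (d : PySem.Dict String Int) (k : String) (v : Int)
    (hc : d.contains k = true) :
    (d.insert k v).items.map Prod.fst = d.items.map Prod.fst := by
  rw [PySem.Dict.items_insert_of_contains d v hc, List.map_map]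
  apply List.map_congr_left
  intro p _
  by_cases hk : p.1 = k <;> simp [hk]

theorem nodup_erase (d : PySem.Dict String Int) (k : String)
    (hnd : (d.items.map Prod.fst).Nodup) : ((d.erase k).items.map Prod.fst).Nodup := by
  have h2 : (d.erase k).items.Sublist d.items := List.filter_sublist
  exact hnd.sublist (h2.map Prod.fst)

theorem mem_erase_sub (d : PySem.Dict String Int) (k : String) (p : String × Int)
    (h : p ∈ (d.erase k).items) : p ∈ d.items := by
  simp only [PySem.Dict.erase] at h
  exact (List.mem_filter.1 h).1

-- ---- pickSku: structure of one successful pick ----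

theorem pickSku_some_struct (g : List String) (d : PySem.Dict String Int)
    (d' : PySem.Dict String Int) (h : pickSku g d = some d') :
    ∃ sku c, sku ∈ g ∧ d.get? sku = some c ∧
      d' = (if c = 1 then d.erase sku else d.insert sku (c - 1)) := by
  induction g with
  | nil => simp [pickSku] at h
  | cons sku rest ih =>
    rw [pickSku] at h
    by_cases hc : d.contains sku = true
    · rw [if_pos hc] at h
      have hs : (d.get? sku).isSome := by rw [← PySem.Dict.contains_eq_isSome_get?]; exact hc
      obtain ⟨c, hc2⟩ := Option.isSome_iff_exists.1 hs
      refine ⟨sku, c, List.mem_cons_self, hc2, ?_⟩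
      have hmod : d.modify sku 0 (· - 1) = d.insert sku (c - 1) := by
        rw [PySem.Dict.modify, PySem.Dict.getD_of_get?_eq_some _ _ hc2]
      replace h : some (if (d.modify sku 0 (· - 1)).getD sku 0 = 0
          then (d.modify sku 0 (· - 1)).erase sku
          else d.modify sku 0 (· - 1)) = some d' := h
      rw [hmod] at h
      rw [PySem.Dict.getD_insert_self] at h
      by_cases h1 : c = 1
      · rw [if_pos (by omega : c - 1 = 0)] at h
        injection h with h
        rw [if_pos h1, ← h]
        exact insert_erase_self d sku (c - 1)
      · rw [if_neg (by omega : ¬ c - 1 = 0)] at h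
        injection h with h
        rw [if_neg h1, ← h]
    · rw [if_neg hc] at h
      obtain ⟨sku', c, hmem, hg, hd⟩ := ih h
      exact ⟨sku', c, List.mem_cons_of_mem _ hmem, hg, hd⟩

theorem pickSku_none_contains (g : List String) (d : PySem.Dict String Int)
    (h : pickSku g d = none) : ∀ s ∈ g, d.contains s = false := by
  induction g with
  | nil => simp
  | cons sku rest ih =>
    rw [pickSku] at h
    by_cases hc : d.contains sku = true
    · rw [if_pos hc] at h; exact absurd h (by simp)
    · rw [if_neg hc] at h
      intro s hs
      rcases List.mem_cons.1 hs with rfl | hs'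
      · simpa using hc
      · exact ih h s hs'

theorem totL_zero_of_no_contains (g : List String) (d : PySem.Dict String Int)
    (h : ∀ s ∈ g, d.contains s = false) : totL g d.items = 0 := by
  rw [totL_eq_sum]
  apply List.sum_eq_zero
  intro x hx
  obtain ⟨p, hp, rfl⟩ := List.mem_map.1 hx
  by_cases hg : p.1 ∈ g
  · exfalso
    have hc := h p.1 hg
    have : d.contains p.1 = true := by
      simp only [PySem.Dict.contains]
      exact List.any_eq_true.2 ⟨p, hp, by simp⟩
    rw [this] at hc; cases hc
  · simp [hg]

-- one pick preserves the invariants and lowers the group total by exactly 1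
theorem pick_invariants (g : List String) (d d' : PySem.Dict String Int)
    (hnd : (d.items.map Prod.fst).Nodup)
    (hpos : ∀ p ∈ d.items, p.1 ∈ g → 1 ≤ p.2)
    (h : pickSku g d = some d') :
    ((d'.items.map Prod.fst).Nodup ∧ ∀ p ∈ d'.items, p.1 ∈ g → 1 ≤ p.2) ∧
      totL g d'.items = totL g d.items - 1 := by
  obtain ⟨sku, c, hmem, hget, hd'⟩ := pickSku_some_struct g d d' h
  have hitems : (sku, c) ∈ d.items :=
    (PySem.Dict.get?_eq_some_iff_mem_items d sku c hnd).1 hget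
  have hc1 : 1 ≤ c := hpos _ hitems hmem
  have hcont : d.contains sku = true := by
    rw [PySem.Dict.contains_eq_isSome_get?, hget]; rfl
  by_cases h1 : c = 1
  · rw [if_pos h1] at hd'
    subst hd'
    refine ⟨⟨nodup_erase d sku hnd, fun p hp hpg => hpos p (mem_erase_sub d sku p hp) hpg⟩, ?_⟩
    have := totL_filter g d.items sku c hnd hitems
    simp only [PySem.Dict.erase]
    rw [this, if_pos hmem, h1]
  · rw [if_neg h1] at hd'
    subst hd'
    refine ⟨⟨?_, ?_⟩, ?_⟩
    · rw [keys_insert_existing d sku (c - 1) hcont]; exact hnd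
    · intro p hp hpg
      rw [PySem.Dict.items_insert_of_contains d (c - 1) hcont] at hp
      obtain ⟨q, hq, hqe⟩ := List.mem_map.1 hp
      by_cases hqk : q.1 = sku
      · rw [if_pos (by simp [hqk])] at hqe
        rw [← hqe]
        show (1 : Int) ≤ c - 1
        omega
      · rw [if_neg (by simp [hqk])] at hqe
        rw [← hqe] at hpg ⊢
        exact hpos q hq hpg
    · rw [PySem.Dict.items_insert_of_contains d (c - 1) hcont,
        totL_update g d.items sku c (c - 1) hnd hitems, if_pos hmem]
      ring

theorem pick_get?_none (g : List String) (d d' : PySem.Dict String Int) (k : String)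
    (h : pickSku g d = some d') (hk : d.get? k = none) : d'.get? k = none := by
  obtain ⟨sku, c, _, hget, hd'⟩ := pickSku_some_struct g d d' h
  have hne : k ≠ sku := fun he => by rw [he, hget] at hk; cases hk
  by_cases h1 : c = 1
  · rw [hd', if_pos h1, get?_erase_of_ne d sku k hne, hk]
  · rw [hd', if_neg h1, PySem.Dict.get?_insert_of_ne _ _ hne, hk]

theorem consume_nonpos (d : PySem.Dict String Int) (g : List String) (r : Int) (hr : r ≤ 0) :
    consumeB d g r = d := by
  cases g with
  | nil => rfl
  | cons sku rest => rw [consumeB, if_pos hr]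

-- the crux: consuming r items in bulk = one greedy pick, then consuming r - 1
theorem consume_step (g : List String) (d d' : PySem.Dict String Int) (r : Int)
    (hnd : (d.items.map Prod.fst).Nodup)
    (hpos : ∀ p ∈ d.items, p.1 ∈ g → 1 ≤ p.2)
    (h : pickSku g d = some d') (hr : 1 ≤ r) :
    consumeB d g r = consumeB d' g (r - 1) := by
  have hr0 : ¬ r ≤ 0 := by omega
  induction g with
  | nil => simp [pickSku] at h
  | cons sku rest ih =>
    rw [pickSku] at h
    by_cases hc : d.contains sku = true
    · rw [if_pos hc] at h
      have hs : (d.get? sku).isSome := by rw [← PySem.Dict.contains_eq_isSome_get?]; exact hc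
      obtain ⟨c, hc2⟩ := Option.isSome_iff_exists.1 hs
      have hmod : d.modify sku 0 (· - 1) = d.insert sku (c - 1) := by
        rw [PySem.Dict.modify, PySem.Dict.getD_of_get?_eq_some _ _ hc2]
      replace h : some (if (d.modify sku 0 (· - 1)).getD sku 0 = 0
          then (d.modify sku 0 (· - 1)).erase sku
          else d.modify sku 0 (· - 1)) = some d' := h
      rw [hmod, PySem.Dict.getD_insert_self] at h
      have hcmem : (sku, c) ∈ d.items :=
        (PySem.Dict.get?_eq_some_iff_mem_items d sku c hnd).1 hc2
      have hc1 : 1 ≤ c := hpos _ hcmem List.mem_cons_self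
      simp only [consumeB, if_neg hr0, hc2]
      by_cases h1 : c = 1
      · -- the picked sku is exhausted: both sides erase it
        rw [if_pos (by omega : c - 1 = 0)] at h
        injection h with h
        have hd' : d' = d.erase sku := by rw [← h, insert_erase_self]
        have hmin : min c r = 1 := by omega
        rw [hmin, if_pos h1, hd']
        by_cases hr1 : r - 1 ≤ 0
        · rw [if_pos hr1, consume_nonpos _ _ _ hr1]
        · rw [if_neg hr1]
          simp only [get?_erase_self]
      · rw [if_neg (by omega : ¬ c - 1 = 0)] at h
        injection h with h
        have hd' : d' = d.insert sku (c - 1) := h.symm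
        have hget' : d'.get? sku = some (c - 1) := by
          rw [hd']; exact PySem.Dict.get?_insert_self d sku (c - 1)
        by_cases hcr : c ≤ r
        · -- the sku is fully consumed on both sides
          have hr1 : ¬ r - 1 ≤ 0 := by omega
          have hmin : min c r = c := by omega
          rw [hmin, if_pos rfl, if_neg hr1]
          simp only [hget']
          have hmin' : min (c - 1) (r - 1) = c - 1 := by omega
          rw [hmin', if_pos rfl, hd', insert_erase_self,
            (by ring : r - 1 - (c - 1) = r - c)]
        · -- the sku keeps a positive remainder; both sides stop after it
          have hmin : min c r = r := by omega
          have hmodr : d.modify sku 0 (· - r) = d.insert sku (c - r) := by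
            rw [PySem.Dict.modify, PySem.Dict.getD_of_get?_eq_some _ _ hc2]
          rw [hmin, if_neg (by omega : ¬ c = r), hmodr,
            consume_nonpos _ _ _ (by omega : r - r ≤ 0)]
          by_cases hr1 : r - 1 ≤ 0
          · rw [if_pos hr1, hd']
            have : c - 1 = c - r := by omega
            rw [this]
          · rw [if_neg hr1]
            simp only [hget']
            have hmin' : min (c - 1) (r - 1) = r - 1 := by omega
            have hmodr' : d'.modify sku 0 (· - (r - 1)) = d.insert sku (c - r) := by
              rw [PySem.Dict.modify, PySem.Dict.getD_of_get?_eq_some _ _ hget', hd',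
                PySem.Dict.insert_insert_self, (by ring : c - 1 - (r - 1) = c - r)]
            rw [hmin', if_neg (by omega : ¬ c - 1 = r - 1), hmodr',
              consume_nonpos _ _ _ (by omega : r - 1 - (r - 1) ≤ 0)]
    · rw [if_neg hc] at h
      have hget : d.get? sku = none := by
        have h2 : (d.get? sku).isSome = false := by
          rw [← PySem.Dict.contains_eq_isSome_get?]
          exact eq_false_of_ne_true hc
        exact Option.not_isSome_iff_eq_none.1 (by simp [h2])
      have hget' : d'.get? sku = none := pick_get?_none rest d d' sku h hget
      have ihr := ih (fun p hp hg => hpos p hp (List.mem_cons_of_mem _ hg)) h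
      simp only [consumeB, if_neg hr0, hget]
      by_cases hr1 : r - 1 ≤ 0
      · rw [if_pos hr1, ihr, consume_nonpos _ _ _ hr1]
      · rw [if_neg hr1]
        simp only [hget']
        exact ihr

-- n successful picks: count = min n total; bulk consumption commutes with the pick chain
theorem pickN_full (g : List String) (n : Nat) (d : PySem.Dict String Int)
    (hnd : (d.items.map Prod.fst).Nodup)
    (hpos : ∀ p ∈ d.items, p.1 ∈ g → 1 ≤ p.2) :
    (pickN g n d).1 = min (n : Int) (totL g d.items) ∧
    ((n : Int) ≤ totL g d.items →
      ((((pickN g n d).2.items.map Prod.fst).Nodup ∧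
        ∀ p ∈ (pickN g n d).2.items, p.1 ∈ g → 1 ≤ p.2) ∧
       totL g (pickN g n d).2.items = totL g d.items - n ∧
       ∀ r : Int, (n : Int) ≤ r → consumeB d g r = consumeB (pickN g n d).2 g (r - n))) := by
  induction n generalizing d with
  | zero =>
    have ht0 := totL_nonneg g d.items hpos
    refine ⟨by simp [pickN]; omega, fun _ => ⟨⟨hnd, hpos⟩, by simp [pickN], ?_⟩⟩
    intro r _
    simp [pickN]
  | succ n ih =>
    have ht0 := totL_nonneg g d.items hpos
    cases hps : pickSku g d with
    | none =>
      have ht : totL g d.items = 0 :=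
        totL_zero_of_no_contains g d (pickSku_none_contains g d hps)
      simp only [pickN, hps]
      constructor
      · simp [ht]; omega
      · intro hle
        rw [ht] at hle
        exfalso
        have : (0 : Int) < ((n : Int) + 1) := by positivity
        simp at hle
        omega
    | some d1 =>
      simp only [pickN, hps]
      obtain ⟨⟨hnd1, hpos1⟩, htot1⟩ := pick_invariants g d d1 hnd hpos hps
      have ht1 : 1 ≤ totL g d.items := by
        obtain ⟨sku, c, hmem, hget, _⟩ := pickSku_some_struct g d d1 hps
        exact totL_pos g d.items (sku, c)
          hpos ((PySem.Dict.get?_eq_some_iff_mem_items d sku c hnd).1 hget) hmem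
      obtain ⟨ih1, ih2⟩ := ih d1 hnd1 hpos1
      constructor
      · rw [ih1, htot1]
        push_cast
        omega
      · intro hle
        have hle' : (n : Int) ≤ totL g d1.items := by
          rw [htot1]; push_cast at hle ⊢; omega
        obtain ⟨hinv2, htot2, hcons2⟩ := ih2 hle'
        refine ⟨hinv2, by rw [htot2, htot1]; push_cast; ring, ?_⟩
        intro r hr
        have hr1 : 1 ≤ r := by push_cast at hr; omega
        rw [consume_step g d d1 r hnd hpos hps hr1, hcons2 (r - 1) (by push_cast at hr ⊢; omega)]
        have : r - 1 - (n : Int) = r - ((n : Nat) + 1 : Nat) := by push_cast; ring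
        rw [this]

theorem whileA_spec (g : List String) (size : Int) (hsz : 1 ≤ size) :
    ∀ (fuel : Nat) (d : PySem.Dict String Int) (acc : Int),
    (d.items.map Prod.fst).Nodup →
    (∀ p ∈ d.items, p.1 ∈ g → 1 ≤ p.2) →
    (totL g d.items).toNat < fuel →
    whileLoopA g size fuel acc d =
      (acc + PySem.Int.floordiv (totL g d.items) size,
       consumeB d g (PySem.Int.floordiv (totL g d.items) size * size)) := by
  intro fuel
  induction fuel with
  | zero => intro d acc _ _ hf; omega
  | succ fuel ih =>
    intro d acc hnd hpos hf
    have ht0 := totL_nonneg g d.items hpos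
    have hszn : (size.toNat : Int) = size := Int.toNat_of_nonneg (by omega)
    have hdiv : PySem.Int.floordiv (totL g d.items) size = totL g d.items / size :=
      PySem.Int.floordiv_eq_ediv_of_pos (by omega)
    obtain ⟨hp1, hp2⟩ := pickN_full g size.toNat d hnd hpos
    simp only [whileLoopA]
    by_cases hts : size ≤ totL g d.items
    · have hle : (size.toNat : Int) ≤ totL g d.items := by omega
      have h1 : (pickN g size.toNat d).1 = size := by rw [hp1]; omega
      rw [if_pos h1]
      obtain ⟨⟨hnd1, hpos1⟩, htot1, hcons1⟩ := hp2 hle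
      rw [hszn] at htot1 hcons1
      have hf1 : (totL g (pickN g size.toNat d).2.items).toNat < fuel := by
        rw [htot1]; omega
      rw [ih (pickN g size.toNat d).2 (acc + 1) hnd1 hpos1 hf1]
      have hdiv1 : PySem.Int.floordiv (totL g (pickN g size.toNat d).2.items) size
          = totL g d.items / size - 1 := by
        rw [PySem.Int.floordiv_eq_ediv_of_pos (by omega), htot1]
        calc (totL g d.items - size) / size
            = (totL g d.items + (-1) * size) / size := by ring_nf
          _ = totL g d.items / size + (-1) := Int.add_mul_ediv_right _ _ (by omega)
          _ = totL g d.items / size - 1 := by ring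
      have hq1 : 1 ≤ totL g d.items / size :=
        (Int.le_ediv_iff_mul_le (by omega)).2 (by omega)
      have hge : size ≤ totL g d.items / size * size := by
        have := mul_le_mul_of_nonneg_right hq1 (by omega : (0 : Int) ≤ size)
        omega
      rw [hdiv1, hdiv,
        (by ring : (totL g d.items / size - 1) * size = totL g d.items / size * size - size),
        ← hcons1 (totL g d.items / size * size) hge, Prod.mk.injEq]
      exact ⟨by ring, rfl⟩
    · have h1 : ¬ (pickN g size.toNat d).1 = size := by rw [hp1]; omega
      rw [if_neg h1, hdiv, Int.ediv_eq_zero_of_lt ht0 (by omega),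
        consume_nonpos _ _ _ (by simp), add_zero]

-- ===== VERDICT (by name: the statement is the Claim_ definition above) =====
theorem count_priciest_group_multibuys_spec : Claim_equal_count_priciest_group_multibuys := by
  intro sku_counts g size _ hpre
  obtain ⟨hnd, hcase⟩ := hpre
  show count_priciest_group_multibuys sku_counts g size
      = count_priciest_group_multibuys_alt sku_counts g size
  rcases hcase with hneg | ⟨hsz, hpos⟩
  · -- negative multibuy size: A's first round picks nothing and returns unchanged
    simp only [count_priciest_group_multibuys, count_priciest_group_multibuys_alt,
      whileLoopA]
    rw [if_pos (by omega : size ≤ 0), (by omega : size.toNat = 0)]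
    simp only [pickN]
    rw [if_neg (by omega : ¬ (0 : Int) = size)]
  · simp only [count_priciest_group_multibuys, count_priciest_group_multibuys_alt]
    rw [if_neg (by omega : ¬ size ≤ 0)]
    have hfuel : (totL g sku_counts).toNat
        < sku_counts.foldl (fun a p => a + p.2.toNat) 0 + 1 := by
      have := totL_le_fuel g sku_counts
      omega
    rw [whileA_spec g size hsz (sku_counts.foldl (fun a p => a + p.2.toNat) 0 + 1)
      ⟨sku_counts⟩ 0 hnd hpos hfuel, zero_add,
      show totL g sku_counts = totL (PySem.List.dedup g) sku_counts from
        (totL_dedup g sku_counts).symm]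
    rfl
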